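-- pv_equiv track=rewrite | github.com/AndreaLandriscina/Three-Way-Decision-Tree | ThreeWay.py | sub_groups
-- ===== SOURCE A (Python) =====
-- def sub_groups(instances, attribute):
--     # for each element x create two sub-groups (<= x and > x)
--     sub_groups = list()
--     for instance in instances:
--         tmpList = list()
--         lower = list()
--         higher = list()
--         for instance1 in instances:
--             if attribute[instance1] <= attribute[instance]:
--                 lower.append(instance1)
--             else:
--                 higher.append(instance1)
--         tmpList.append(lower)
--         tmpList.append(higher)
--         sub_groups.append(tmpList)
--     return sub_groups
-- ===== SOURCE B (Python) =====
-- def sub_groups(instances, attribute):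
--     # Compute each distinct threshold's [lower, higher] partition once, then map instances to it.
--     parts = {}
--     for inst in instances:
--         v = attribute[inst]
--         if v not in parts:
--             parts[v] = [[i for i in instances if attribute[i] <= v],
--                         [i for i in instances if attribute[i] > v]]
--     return [parts[attribute[inst]] for inst in instances]
-- ===== Notes on version B (the rewrite author's own statement) =====
-- stated objective: alternative
-- what changed: B builds each distinct attribute value's [lower, higher] partition once in a dict and then maps instances to the precomputed partitions, instead of A's per-instance rescan of all instances; avoids repeated work when attribute values repeat (timing not measurable here).
import Mathlib
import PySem

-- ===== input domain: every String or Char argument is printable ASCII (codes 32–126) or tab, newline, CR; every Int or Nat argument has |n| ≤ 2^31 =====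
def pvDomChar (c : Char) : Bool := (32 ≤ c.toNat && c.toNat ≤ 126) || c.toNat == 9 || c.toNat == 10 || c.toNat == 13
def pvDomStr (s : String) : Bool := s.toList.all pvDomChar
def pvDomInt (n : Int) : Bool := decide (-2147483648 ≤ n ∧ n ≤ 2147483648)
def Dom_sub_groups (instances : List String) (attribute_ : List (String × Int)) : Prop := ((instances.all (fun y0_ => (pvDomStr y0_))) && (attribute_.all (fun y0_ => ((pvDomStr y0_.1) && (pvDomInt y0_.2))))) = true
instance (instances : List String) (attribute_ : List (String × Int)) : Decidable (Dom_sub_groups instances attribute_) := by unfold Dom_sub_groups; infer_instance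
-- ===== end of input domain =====

-- B precomputes each distinct attribute value's [lower, higher] partition once in a dict and maps
-- instances to it, instead of A's per-instance rescan of all instances (alternative decomposition; return value only).


-- shared helper: attribute[x] (dict lookup; total form — Pre_ guarantees the key is present)
def pvAtt (attribute_ : List (String × Int)) (x : String) : Int :=
  ((PySem.Dict.mk attribute_).get? x).getD 0

-- ===== PORT A =====
def sub_groups (instances : List String) (attribute_ : List (String × Int)) : List (List (List String)) :=
  instances.foldl (fun sub_groups_ instance_ =>
    let lh := instances.foldl
      (fun (p : List String × List String) instance1 =>
        if pvAtt attribute_ instance1 ≤ pvAtt attribute_ instance_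
        then (p.1 ++ [instance1], p.2)
        else (p.1, p.2 ++ [instance1]))
      ([], [])
    sub_groups_ ++ [[lh.1, lh.2]]) []

-- ===== PORT B =====
def pvPartitionFor (instances : List String) (attribute_ : List (String × Int)) (v : Int) : List (List String) :=
  [instances.filter (fun i => decide (pvAtt attribute_ i ≤ v)),
   instances.filter (fun i => decide (v < pvAtt attribute_ i))]

def sub_groups_alt (instances : List String) (attribute_ : List (String × Int)) : List (List (List String)) :=
  let parts : PySem.Dict Int (List (List String)) :=
    instances.foldl (fun d inst =>
      let v := pvAtt attribute_ inst
      if d.contains v then d else d.insert v (pvPartitionFor instances attribute_ v))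
      PySem.Dict.empty
  instances.map (fun inst => parts.getD (pvAtt attribute_ inst) [])

-- ===== PRECONDITION & SPEC =====
-- every instance must be a key of the attribute dict (Python A raises KeyError otherwise; B raises too)
def Pre_sub_groups (instances : List String) (attribute_ : List (String × Int)) : Prop :=
  ∀ x ∈ instances, ((PySem.Dict.mk attribute_).get? x).isSome = true
instance (instances : List String) (attribute_ : List (String × Int)) : Decidable (Pre_sub_groups instances attribute_) := by unfold Pre_sub_groups; infer_instance

def pvWitness_sub_groups : List String × (List (String × Int)) :=
  (["a", "b", "a"], [("a", 1), ("b", 2)])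

def Spec_sub_groups (instances : List String) (attribute_ : List (String × Int)) (out : List (List (List String))) : Prop := out = sub_groups_alt instances attribute_
instance (instances : List String) (attribute_ : List (String × Int)) (out : List (List (List String))) : Decidable (Spec_sub_groups instances attribute_ out) := by unfold Spec_sub_groups; infer_instance

-- ===== CLAIM (what is proved, stated in full; the proofs are below) =====
def Claim_equal_sub_groups : Prop := ∀ (instances : List String) (attribute_ : List (String × Int)), Dom_sub_groups instances attribute_ → Pre_sub_groups instances attribute_ → Spec_sub_groups instances attribute_ (sub_groups instances attribute_)

-- ===== LEMMAS AND PROOFS =====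

-- A's inner loop is a partition into (filter p, filter ¬p)
theorem pvPartition_fold (q : String → Prop) [DecidablePred q] (l : List String) (a b : List String) :
    l.foldl (fun (acc : List String × List String) x =>
        if q x then (acc.1 ++ [x], acc.2) else (acc.1, acc.2 ++ [x])) (a, b)
    = (a ++ l.filter (fun x => decide (q x)), b ++ l.filter (fun x => !decide (q x))) := by
  induction l generalizing a b with
  | nil => simp
  | cons x xs ih =>
    by_cases h : q x
    · simp [List.foldl_cons, h, ih]
    · simp [List.foldl_cons, h, ih]

theorem pvA_eq_map (instances : List String) (attribute_ : List (String × Int)) :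
    sub_groups instances attribute_
    = instances.map (fun inst => pvPartitionFor instances attribute_ (pvAtt attribute_ inst)) := by
  unfold sub_groups
  simp only [pvPartition_fold]
  rw [PySem.List.foldl_append_singleton_eq_map]
  simp only [List.nil_append, pvPartitionFor]
  refine List.map_congr_left (fun a _ => ?_)
  have h2 : List.filter (fun x => !decide (pvAtt attribute_ x ≤ pvAtt attribute_ a)) instances
      = List.filter (fun i => decide (pvAtt attribute_ a < pvAtt attribute_ i)) instances :=
    List.filter_congr (fun i _ => by rw [← decide_not]; exact decide_eq_decide.mpr not_le)
  rw [h2]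

-- proof-only abbreviation for the body of B's first pass (definitionally the lambda in sub_groups_alt)
def pvStep (instances : List String) (attribute_ : List (String × Int))
    (d : PySem.Dict Int (List (List String))) (inst : String) : PySem.Dict Int (List (List String)) :=
  let v := pvAtt attribute_ inst
  if d.contains v then d else d.insert v (pvPartitionFor instances attribute_ v)

-- the dict invariant of B's first pass: every stored value is the partition for its key,
-- membership is monotone, and after the pass every instance's attribute value is a key
theorem pvParts_inv (instances : List String) (attribute_ : List (String × Int))
    (l : List String) (d : PySem.Dict Int (List (List String)))
    (hd : ∀ v, d.contains v = true → d.getD v [] = pvPartitionFor instances attribute_ v) :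
    (∀ v, (l.foldl (pvStep instances attribute_) d).contains v = true →
        (l.foldl (pvStep instances attribute_) d).getD v [] = pvPartitionFor instances attribute_ v)
    ∧ (∀ v, d.contains v = true → (l.foldl (pvStep instances attribute_) d).contains v = true)
    ∧ (∀ x ∈ l, (l.foldl (pvStep instances attribute_) d).contains (pvAtt attribute_ x) = true) := by
  induction l generalizing d with
  | nil => exact ⟨hd, fun v h => h, by simp⟩
  | cons x xs ih =>
    have hstep : ∀ v, (pvStep instances attribute_ d x).contains v = true →
        (pvStep instances attribute_ d x).getD v [] = pvPartitionFor instances attribute_ v := by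
      intro v hv
      unfold pvStep at hv ⊢
      by_cases hc : d.contains (pvAtt attribute_ x) = true
      · simp only [hc, if_true] at hv ⊢
        exact hd v hv
      · simp only [hc, if_false, Bool.false_eq_true] at hv ⊢
        rw [PySem.Dict.getD_insert]
        by_cases hvx : v = pvAtt attribute_ x
        · simp [hvx]
        · rw [PySem.Dict.contains_insert] at hv
          rw [if_neg hvx]
          refine hd v ?_
          cases hb : d.contains v with
          | true => rfl
          | false => rw [hb, Bool.or_false] at hv; exact absurd (beq_iff_eq.mp hv) hvx
    have hmono : ∀ v, d.contains v = true → (pvStep instances attribute_ d x).contains v = true := by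
      intro v hv
      unfold pvStep
      by_cases hc : d.contains (pvAtt attribute_ x) = true
      · simpa [hc]
      · simp only [hc, if_false, Bool.false_eq_true]
        rw [PySem.Dict.contains_insert, hv]
        simp
    have hx : (pvStep instances attribute_ d x).contains (pvAtt attribute_ x) = true := by
      unfold pvStep
      by_cases hc : d.contains (pvAtt attribute_ x) = true
      · simp [hc]
      · simp only [hc, if_false, Bool.false_eq_true]
        exact PySem.Dict.contains_insert_self _ _ _
    obtain ⟨h1, h2, h3⟩ := ih (pvStep instances attribute_ d x) hstep
    refine ⟨by simpa [List.foldl_cons] using h1, ?_, ?_⟩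
    · intro v hv
      simpa [List.foldl_cons] using h2 v (hmono v hv)
    · intro y hy
      rcases List.mem_cons.mp hy with rfl | hy'
      · simpa [List.foldl_cons] using h2 _ hx
      · simpa [List.foldl_cons] using h3 y hy'

theorem pvB_eq_map (instances : List String) (attribute_ : List (String × Int)) :
    sub_groups_alt instances attribute_
    = instances.map (fun inst => pvPartitionFor instances attribute_ (pvAtt attribute_ inst)) := by
  obtain ⟨h1, -, h3⟩ := pvParts_inv instances attribute_ instances PySem.Dict.empty
    (by intro v hv; simp [PySem.Dict.contains_empty] at hv)
  show instances.map (fun inst =>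
      (instances.foldl (pvStep instances attribute_) PySem.Dict.empty).getD (pvAtt attribute_ inst) []) = _
  exact List.map_congr_left (fun inst hmem => h1 _ (h3 inst hmem))

-- ===== VERDICT (by name: the statement is the Claim_ definition above) =====
theorem sub_groups_spec : Claim_equal_sub_groups := by
  intro instances attribute_ _ _
  unfold Spec_sub_groups
  rw [pvA_eq_map, pvB_eq_map]
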